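-- pv_equiv track=rewrite | github.com/Brinnerr/Agri_Nova--main1 | shamba-score-ai/api/utils.py | get_feature_category
-- ===== SOURCE A (Python) =====
-- def get_feature_category(feature: str) -> str:
--     """Get category for a feature"""
--     categories = {
--         "satellite": ["mean_ndvi", "ndvi_trend", "growing_season_match"],
--         "financial": ["transaction_velocity", "savings_rate", "loan_repayment_history"],
--         "community": ["cooperative_endorsement", "chama_participation", "neighbor_vouches"],
--         "agricultural": ["fertilizer_purchase_timing", "seed_quality_tier", "advisory_usage"],
--         "climate": ["drought_exposure_index", "rainfall_deviation", "temperature_anomaly"]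
--     }
--
--     for category, features in categories.items():
--         if feature in features:
--             return category
--     return "other"
-- ===== SOURCE B (Python) =====
-- _FEATURE_TO_CATEGORY = {
--     "mean_ndvi": "satellite", "ndvi_trend": "satellite", "growing_season_match": "satellite",
--     "transaction_velocity": "financial", "savings_rate": "financial", "loan_repayment_history": "financial",
--     "cooperative_endorsement": "community", "chama_participation": "community", "neighbor_vouches": "community",
--     "fertilizer_purchase_timing": "agricultural", "seed_quality_tier": "agricultural", "advisory_usage": "agricultural",
--     "drought_exposure_index": "climate", "rainfall_deviation": "climate", "temperature_anomaly": "climate",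
-- }
--
-- def get_feature_category(feature: str) -> str:
--     """Get category for a feature"""
--     return _FEATURE_TO_CATEGORY.get(feature, "other")
-- ===== Notes on version B (the rewrite author's own statement) =====
-- stated objective: simpler
-- what changed: Replaces the per-call loop over category lists with membership tests by a single precomputed flat feature-to-category dict and one O(1) lookup with default.
import Mathlib
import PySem

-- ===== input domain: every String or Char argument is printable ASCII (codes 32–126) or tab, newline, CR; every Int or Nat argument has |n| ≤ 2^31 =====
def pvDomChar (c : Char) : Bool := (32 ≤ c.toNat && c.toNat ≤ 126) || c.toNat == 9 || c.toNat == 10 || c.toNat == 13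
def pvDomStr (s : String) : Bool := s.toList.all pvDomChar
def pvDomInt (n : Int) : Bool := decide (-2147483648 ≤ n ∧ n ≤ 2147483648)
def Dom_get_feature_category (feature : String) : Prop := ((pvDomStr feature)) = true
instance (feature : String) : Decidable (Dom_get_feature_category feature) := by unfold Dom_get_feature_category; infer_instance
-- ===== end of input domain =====

-- B replaces A's per-call loop over category feature-lists with one precomputed flat feature->category dict lookup (simpler).



-- ===== PORT A =====
-- the categories dict of A, as an insertion-ordered association list
def pvCategories : List (String × List String) := [
  ("satellite", ["mean_ndvi", "ndvi_trend", "growing_season_match"]),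
  ("financial", ["transaction_velocity", "savings_rate", "loan_repayment_history"]),
  ("community", ["cooperative_endorsement", "chama_participation", "neighbor_vouches"]),
  ("agricultural", ["fertilizer_purchase_timing", "seed_quality_tier", "advisory_usage"]),
  ("climate", ["drought_exposure_index", "rainfall_deviation", "temperature_anomaly"])]

-- for category, features in categories.items(): if feature in features: return category; return "other"
def get_feature_category (feature : String) : String :=
  match pvCategories.find? (fun p => p.2.contains feature) with
  | some p => p.1
  | none => "other"

-- ===== PORT B =====
-- B: one precomputed flat feature->category dict, single lookup with default
def pvFeatureToCategory : PySem.Dict String String := PySem.Dict.ofList [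
  ("mean_ndvi", "satellite"),
  ("ndvi_trend", "satellite"),
  ("growing_season_match", "satellite"),
  ("transaction_velocity", "financial"),
  ("savings_rate", "financial"),
  ("loan_repayment_history", "financial"),
  ("cooperative_endorsement", "community"),
  ("chama_participation", "community"),
  ("neighbor_vouches", "community"),
  ("fertilizer_purchase_timing", "agricultural"),
  ("seed_quality_tier", "agricultural"),
  ("advisory_usage", "agricultural"),
  ("drought_exposure_index", "climate"),
  ("rainfall_deviation", "climate"),
  ("temperature_anomaly", "climate")]

def get_feature_category_alt (feature : String) : String :=
  PySem.Dict.getD pvFeatureToCategory feature "other"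

-- ===== PRECONDITION & SPEC =====
def Spec_get_feature_category (feature : String) (out : String) : Prop := out = get_feature_category_alt feature
instance (feature : String) (out : String) : Decidable (Spec_get_feature_category feature out) := by unfold Spec_get_feature_category; infer_instance

-- ===== CLAIM (what is proved, stated in full; the proofs are below) =====
def Claim_equal_get_feature_category : Prop := ∀ (feature : String), Dom_get_feature_category feature → Spec_get_feature_category feature (get_feature_category feature)

-- ===== LEMMAS AND PROOFS =====

-- ===== VERDICT =====

def pvFlat (ps : List (String × List String)) : List (String × String) :=
  ps.flatMap (fun p => p.2.map (fun x => (x, p.1)))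

theorem pvGetD_block (c : String) (fs : List String) (rest : List (String × String)) (f : String) :
    PySem.Dict.getD (PySem.Dict.mk (fs.map (fun x => (x, c)) ++ rest)) f "other"
      = if fs.contains f then c else PySem.Dict.getD (PySem.Dict.mk rest) f "other" := by
  induction fs with
  | nil => simp
  | cons x xs ih =>
    by_cases hx : x = f
    · subst hx
      simp [PySem.Dict.getD_eq_get?_getD, PySem.Dict.get?_mk_cons]
    · have hbx : (x == f) = false := by simp [hx]
      have hbf : (f == x) = false := by simp; exact fun h => hx h.symm
      simp only [List.map_cons, List.cons_append, PySem.Dict.getD_eq_get?_getD,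
        PySem.Dict.get?_mk_cons, hbx, Bool.false_eq_true, if_false, List.contains_cons, hbf,
        Bool.false_or]
      simpa [PySem.Dict.getD_eq_get?_getD] using ih

theorem pvKey (ps : List (String × List String)) (f : String) :
    (match ps.find? (fun p => p.2.contains f) with
     | some p => p.1
     | none => "other")
      = PySem.Dict.getD (PySem.Dict.mk (pvFlat ps)) f "other" := by
  induction ps with
  | nil => simp [pvFlat, PySem.Dict.getD_eq_get?_getD, PySem.Dict.get?]
  | cons p rest ih =>
    rw [pvFlat, List.flatMap_cons, pvGetD_block, List.find?_cons]
    by_cases hm : f ∈ p.2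
    · simp [hm]
    · simp only [hm, if_false, List.contains_eq_mem, decide_eq_true_eq]
      simpa [pvFlat] using ih

theorem get_feature_category_spec : Claim_equal_get_feature_category := by
  intro f _
  unfold Spec_get_feature_category
  have h : pvFeatureToCategory = PySem.Dict.mk (pvFlat pvCategories) := by decide
  show get_feature_category f = _
  rw [get_feature_category, get_feature_category_alt, h]
  exact pvKey pvCategories f
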